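-- pv_equiv track=rewrite | github.com/andreforjazz/Convnext_stardist | shared_convnext_stardist_decoder/inference_utils.py | build_tile_coords
-- ===== SOURCE A (Python) =====
-- def build_tile_coords(
--     w_slide: int,
--     h_slide: int,
--     tile_size: int,
--     tile_overlap: int,
-- ) -> list[tuple[int, int, int, int]]:
--     """
--     Build the full list of ``(x0, y0, tile_width, tile_height)`` for a WSI tile grid.
--
--     Edge tiles may be smaller than ``tile_size``.
--     Tiles with either dimension < 8 px are dropped.
--     ``step = tile_size - tile_overlap``
--     """
--     step = max(1, tile_size - int(tile_overlap))
--     coords: list[tuple[int, int, int, int]] = []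
--     for y0 in range(0, h_slide, step):
--         for x0 in range(0, w_slide, step):
--             tw = min(tile_size, w_slide - x0)
--             th = min(tile_size, h_slide - y0)
--             if tw >= 8 and th >= 8:
--                 coords.append((x0, y0, tw, th))
--     return coords
-- ===== SOURCE B (Python) =====
-- def build_tile_coords(w_slide, h_slide, tile_size, tile_overlap):
--     step = max(1, tile_size - int(tile_overlap))
--     # Closed form: a tile survives iff tile_size >= 8 and the remaining extent
--     # at its origin is >= 8, i.e. origin <= extent - 8; count those directly.
--     if tile_size < 8 or w_slide < 8 or h_slide < 8:
--         return []
--     nx = (w_slide - 8) // step + 1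
--     ny = (h_slide - 8) // step + 1
--     return [(i * step, j * step,
--              min(tile_size, w_slide - i * step),
--              min(tile_size, h_slide - j * step))
--             for j in range(ny) for i in range(nx)]
-- ===== Notes on version B (the rewrite author's own statement) =====
-- stated objective: alternative
-- what changed: Instead of scanning the full grid and testing each tile against the >=8 threshold, B computes the number of surviving tiles per axis in closed form ((extent-8)//step + 1, empty if tile_size or an extent is below 8) and generates the coordinates directly by index arithmetic, with no per-tile filter.
import Mathlib
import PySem

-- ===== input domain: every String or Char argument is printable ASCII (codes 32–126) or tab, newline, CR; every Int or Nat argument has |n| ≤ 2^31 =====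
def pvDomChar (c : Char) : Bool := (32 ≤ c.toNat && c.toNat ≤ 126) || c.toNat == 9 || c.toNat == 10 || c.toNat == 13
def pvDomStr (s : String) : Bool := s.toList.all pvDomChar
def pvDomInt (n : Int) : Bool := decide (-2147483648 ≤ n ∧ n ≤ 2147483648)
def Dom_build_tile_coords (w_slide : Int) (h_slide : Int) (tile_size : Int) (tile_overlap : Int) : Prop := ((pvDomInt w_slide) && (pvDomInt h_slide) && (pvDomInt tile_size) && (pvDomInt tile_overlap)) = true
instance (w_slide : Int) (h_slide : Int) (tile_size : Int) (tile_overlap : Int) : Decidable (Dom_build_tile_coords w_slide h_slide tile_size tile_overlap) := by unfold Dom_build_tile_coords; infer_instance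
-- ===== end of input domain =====

-- B replaces A's 2-D scan with per-tile >=8 filter tests by a closed-form count of surviving
-- tiles per axis ((extent-8)//step + 1) and direct index-arithmetic generation; same output.


-- ===== PORT A =====
def build_tile_coords (w_slide : Int) (h_slide : Int) (tile_size : Int) (tile_overlap : Int) : List (Int × Int × Int × Int) :=
  let step := max 1 (tile_size - tile_overlap)
  (PySem.List.pyRange 0 h_slide step).foldl (fun coords y0 =>
    (PySem.List.pyRange 0 w_slide step).foldl (fun coords x0 =>
      let tw := min tile_size (w_slide - x0)
      let th := min tile_size (h_slide - y0)
      if tw ≥ 8 ∧ th ≥ 8 then coords ++ [(x0, y0, tw, th)] else coords) coords) []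

-- ===== PORT B =====
def build_tile_coords_alt (w_slide : Int) (h_slide : Int) (tile_size : Int) (tile_overlap : Int) : List (Int × Int × Int × Int) :=
  let step := max 1 (tile_size - tile_overlap)
  if tile_size < 8 ∨ w_slide < 8 ∨ h_slide < 8 then [] else
  let nx := PySem.Int.floordiv (w_slide - 8) step + 1
  let ny := PySem.Int.floordiv (h_slide - 8) step + 1
  (PySem.List.pyRange 0 ny 1).flatMap (fun j =>
    (PySem.List.pyRange 0 nx 1).map (fun i =>
      (i * step, j * step, min tile_size (w_slide - i * step), min tile_size (h_slide - j * step))))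

-- ===== PRECONDITION & SPEC =====
def Spec_build_tile_coords (w_slide : Int) (h_slide : Int) (tile_size : Int) (tile_overlap : Int) (out : List (Int × Int × Int × Int)) : Prop := out = build_tile_coords_alt w_slide h_slide tile_size tile_overlap
instance (w_slide : Int) (h_slide : Int) (tile_size : Int) (tile_overlap : Int) (out : List (Int × Int × Int × Int)) : Decidable (Spec_build_tile_coords w_slide h_slide tile_size tile_overlap out) := by unfold Spec_build_tile_coords; infer_instance

-- ===== CLAIM (what is proved, stated in full; the proofs are below) =====
def Claim_equal_build_tile_coords : Prop := ∀ (w_slide : Int) (h_slide : Int) (tile_size : Int) (tile_overlap : Int), Dom_build_tile_coords w_slide h_slide tile_size tile_overlap → Spec_build_tile_coords w_slide h_slide tile_size tile_overlap (build_tile_coords w_slide h_slide tile_size tile_overlap)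

-- ===== LEMMAS AND PROOFS =====

-- A's inner x-loop, as a filtered map over the x range.
lemma btc_inner (w ts y0 th : Int) (X : List Int) (acc : List (Int × Int × Int × Int)) :
    X.foldl (fun c x0 =>
      if min ts (w - x0) ≥ 8 ∧ th ≥ 8 then c ++ [(x0, y0, min ts (w - x0), th)] else c) acc
    = acc ++ (if th ≥ 8 then
        ((X.map (fun x0 => (x0, min ts (w - x0)))).filter (fun q => q.2 ≥ 8)).map
          (fun q => (q.1, y0, q.2, th)) else []) := by
  induction X generalizing acc with
  | nil => simp
  | cons x X ih =>
    simp only [List.foldl_cons, List.map_cons, List.filter_cons]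
    rw [ih]
    by_cases hth : th ≥ 8 <;> by_cases htw : min ts (w - x) ≥ 8 <;>
      simp [hth, htw, List.append_assoc]

-- A's whole double loop, as a flatMap over the two filtered axis lists.
lemma btc_key (w h ts : Int) (Y X : List Int) (acc : List (Int × Int × Int × Int)) :
    Y.foldl (fun c y0 =>
      X.foldl (fun c x0 =>
        if min ts (w - x0) ≥ 8 ∧ min ts (h - y0) ≥ 8 then
          c ++ [(x0, y0, min ts (w - x0), min ts (h - y0))] else c) c) acc
    = acc ++ ((Y.map (fun y0 => (y0, min ts (h - y0)))).filter (fun p => p.2 ≥ 8)).flatMap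
        (fun p => ((X.map (fun x0 => (x0, min ts (w - x0)))).filter (fun q => q.2 ≥ 8)).map
          (fun q => (q.1, p.1, q.2, p.2))) := by
  induction Y generalizing acc with
  | nil => simp
  | cons y Y ih =>
    simp only [List.foldl_cons, List.map_cons, List.filter_cons]
    rw [btc_inner, ih]
    by_cases hth : min ts (h - y) ≥ 8 <;> simp [hth, List.append_assoc]

-- Filtering a map over List.range by a prefix predicate is a map over a shorter range.
lemma filter_map_range {α : Type} (f : Nat → α) (P : α → Bool) (N : Nat) :
    ∀ (K : Nat), N ≤ K → (∀ k, k < K → (P (f k) = decide (k < N))) →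
    ((List.range K).map f).filter P = (List.range N).map f := by
  intro K
  induction K with
  | zero => intro hNK _; interval_cases N; simp
  | succ K ih =>
    intro hNK hP
    rcases Nat.lt_or_ge N (K+1) with hlt | hge
    · have hNK' : N ≤ K := Nat.lt_succ_iff.mp hlt
      rw [List.range_succ, List.map_append, List.filter_append,
        ih hNK' (fun k hk => hP k (Nat.lt_succ_of_lt hk))]
      have : P (f K) = false := by
        rw [hP K (Nat.lt_succ_self K)]; simp; omega
      simp [this]
    · have hN : N = K + 1 := le_antisymm hNK hge
      subst hN
      rw [List.filter_eq_self.mpr]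
      intro a ha
      obtain ⟨k, hk, rfl⟩ := List.mem_map.mp ha
      rw [hP k (List.mem_range.mp hk)]
      simp [List.mem_range.mp hk]

-- floordiv with a positive divisor is Euclidean division.
lemma floordiv_pos_eq (a b : Int) (hb : 0 < b) : PySem.Int.floordiv a b = a / b := by
  unfold PySem.Int.floordiv
  rw [Int.fdiv_eq_ediv]
  simp [le_of_lt hb]

-- The surviving positions of a scanned axis are exactly the first (L-8)//step + 1 multiples of step.
lemma axis_closed (ts L step : Int) (hstep : 0 < step) (hts : 8 ≤ ts) (hL : 8 ≤ L) :
    ((PySem.List.pyRange 0 L step).map (fun x => (x, min ts (L - x)))).filter (fun p => p.2 ≥ 8)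
      = (PySem.List.pyRange 0 (PySem.Int.floordiv (L - 8) step + 1) 1).map
          (fun i => (i * step, min ts (L - i * step))) := by
  have hq : PySem.Int.floordiv (L - 8) step = (L - 8) / step := floordiv_pos_eq _ _ hstep
  have hq0 : 0 ≤ (L - 8) / step := Int.ediv_nonneg (by omega) (le_of_lt hstep)
  rw [hq, PySem.List.pyRange_one]
  rw [PySem.List.pyRange_of_pos 0 L hstep]
  have hLpos : (0:Int) < L := by omega
  simp only [if_pos hLpos, sub_zero, List.map_map]
  set N : Nat := ((L - 8) / step + 1).toNat with hNdef
  set K : Nat := ((L + step - 1) / step).toNat with hKdef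
  have hNcast : (N : Int) = (L - 8) / step + 1 := by omega
  have hNK : N ≤ K := by
    have h1 : (L - 8 + step) / step = (L - 8) / step + 1 := by
      have := Int.add_mul_ediv_right (L - 8) 1 (ne_of_gt hstep)
      simpa using this
    have h2 : (L - 8 + step) / step ≤ (L + step - 1) / step :=
      Int.ediv_le_ediv hstep (by omega)
    have h3 : (0:Int) ≤ (L + step - 1) / step := Int.ediv_nonneg (by omega) (le_of_lt hstep)
    omega
  rw [filter_map_range _ _ N K hNK]
  · apply List.map_congr_left
    intro k hk
    have hmc : (0:Int) + step * (k:Int) = (0 + (k:Int)) * step := by ring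
    simp only [Function.comp, hmc]
  · intro k hk
    have hlhs : (fun (p : Int × Int) => decide (p.2 ≥ 8))
        (((fun x => (x, min ts (L - x))) ∘ fun k : Nat => 0 + step * (k:Int)) k)
        = decide (8 ≤ min ts (L - (0 + step * (k:Int)))) := by
      simp [Function.comp]
    show (fun (p : Int × Int) => decide (p.2 ≥ 8))
        (((fun x => (x, min ts (L - x))) ∘ fun k : Nat => 0 + step * (k:Int)) k) = decide (k < N)
    rw [hlhs, decide_eq_decide]
    constructor
    · intro hcond
      have hsk : step * (k:Int) ≤ L - 8 := by
        have h1 := min_le_right ts (L - (0 + step * (k:Int)))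
        have h2 : (8:Int) ≤ L - (0 + step * (k:Int)) := le_trans hcond h1 |>.trans_eq rfl
        linarith [min_le_right ts (L - (0 + step * (k:Int)))]
      have hk' : (k:Int) ≤ (L - 8) / step := by
        rw [Int.le_ediv_iff_mul_le hstep]
        linarith [mul_comm step (k:Int)]
      omega
    · intro hkN
      have hk' : (k:Int) ≤ (L - 8) / step := by omega
      have hmul : (k:Int) * step ≤ (L - 8) / step * step :=
        mul_le_mul_of_nonneg_right hk' (le_of_lt hstep)
      have hfloor : (L - 8) / step * step ≤ L - 8 := Int.ediv_mul_le (L - 8) (ne_of_gt hstep)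
      have hsk : step * (k:Int) ≤ L - 8 := by nlinarith
      have h8 : (8:Int) ≤ L - (0 + step * (k:Int)) := by linarith
      exact le_min hts h8

-- A scanned positive-step axis yields nothing when the extent or the tile size is below 8.
lemma axis_empty (ts L step : Int) (hstep : 0 < step) (h : ts < 8 ∨ L < 8) :
    ((PySem.List.pyRange 0 L step).map (fun x => (x, min ts (L - x)))).filter (fun p => p.2 ≥ 8) = [] := by
  rw [List.filter_eq_nil_iff]
  intro p hp
  obtain ⟨x, hx, rfl⟩ := List.mem_map.mp hp
  have hmem := (PySem.List.mem_pyRange_iff_of_pos hstep x).mp hx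
  simp only [ge_iff_le, decide_eq_true_eq, not_le]
  rcases h with h | h
  · exact lt_of_le_of_lt (min_le_left _ _) h
  · exact lt_of_le_of_lt (min_le_right _ _) (by omega)

-- ===== VERDICT (by name: the statement is the Claim_ definition above) =====
theorem build_tile_coords_spec : Claim_equal_build_tile_coords := by
  intro w h ts ov _
  unfold Spec_build_tile_coords build_tile_coords build_tile_coords_alt
  simp only []
  rw [btc_key]
  set step := max 1 (ts - ov) with hstep_def
  have hstep : 0 < step := lt_of_lt_of_le one_pos (le_max_left _ _)
  by_cases hguard : ts < 8 ∨ w < 8 ∨ h < 8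
  · rw [if_pos hguard]
    rcases hguard with hts | hw | hh
    · rw [axis_empty ts h step hstep (Or.inl hts)]; simp
    · rw [axis_empty ts w step hstep (Or.inr hw)]
      simp [List.flatMap]
    · rw [axis_empty ts h step hstep (Or.inr hh)]; simp
  · rw [if_neg hguard]
    simp only [not_or, not_lt] at hguard
    obtain ⟨hts, hw, hh⟩ := hguard
    rw [axis_closed ts h step hstep hts hh, axis_closed ts w step hstep hts hw]
    rw [List.flatMap_map]
    simp [Function.comp_def]
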